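-- pv_equiv track=rewrite | github.com/faithcomesbyhearing/dbp-etl-web | validate/UnicodeScript.py | parseXMLStrings
-- ===== SOURCE A (Python) =====
-- def parseXMLStrings(lines):
-- 	text = []
-- 	inText = False
-- 	for line in lines:
-- 		for char in line:
-- 			if char == "<":
-- 				inText = False
-- 			if inText and char.isalpha():
-- 				text.append(char)
-- 			if char == ">":
-- 				inText = True
-- 	return text
-- ===== SOURCE B (Python) =====
-- import re
--
-- def parseXMLStrings(lines):
--     s = ''.join(lines)
--     regions = re.findall(r'>([^<]*)', s)
--     return [c for region in regions for c in region if c.isalpha()]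
-- ===== Notes on version B (the rewrite author's own statement) =====
-- stated objective: idiomatic
-- what changed: Replaces the char-by-char state machine with a single regex findall of '>([^<]*)' over the joined input followed by an isalpha filter comprehension.
import Mathlib
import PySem

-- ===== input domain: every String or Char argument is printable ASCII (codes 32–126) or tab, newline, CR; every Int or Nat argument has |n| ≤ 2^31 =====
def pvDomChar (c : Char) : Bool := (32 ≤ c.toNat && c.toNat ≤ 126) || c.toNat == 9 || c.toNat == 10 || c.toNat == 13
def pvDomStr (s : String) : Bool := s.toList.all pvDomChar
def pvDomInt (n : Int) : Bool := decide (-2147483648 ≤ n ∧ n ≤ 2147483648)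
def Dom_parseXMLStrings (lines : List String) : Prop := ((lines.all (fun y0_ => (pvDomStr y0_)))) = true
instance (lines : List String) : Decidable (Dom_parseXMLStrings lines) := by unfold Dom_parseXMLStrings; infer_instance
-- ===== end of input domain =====

-- B replaces A's character-by-character state machine with a regex findall of '>([^<]*)'
-- over the joined input followed by an isalpha filter (idiomatic; same cost).

-- ===== PORT A =====
-- one step of A's inner loop: the three ifs in source order, state = (text, inText)
def pvStepA (st : List String × Bool) (c : Char) : List String × Bool :=
  let inText := if c = '<' then false else st.2
  let text := if inText && PySem.Chars.isalpha c then st.1 ++ [String.mk [c]] else st.1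
  let inText := if c = '>' then true else inText
  (text, inText)

def parseXMLStrings (lines : List String) : List String :=
  (lines.foldl (fun st line => line.toList.foldl pvStepA st) ([], false)).1

-- ===== PORT B =====
-- re.findall(r'>([^<]*)', s): at each '>', the maximal following run of non-'<' chars
-- (re.span of the region = takeWhile/dropWhile on (· ≠ '<')), scanning resumes after the run.
def pvFindGT : List Char → List (List Char)
  | [] => []
  | c :: rest =>
    if c = '>' then
      (rest.takeWhile (· ≠ '<')) :: pvFindGT (rest.dropWhile (· ≠ '<'))
    else pvFindGT rest
termination_by cs => cs.length
decreasing_by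
  · simp only [List.length_cons]
    exact Nat.lt_succ_of_le (List.length_dropWhile_le _ _)
  · simp

def parseXMLStrings_alt (lines : List String) : List String :=
  -- s = ''.join(lines), as its character list
  let s := (lines.map String.toList).flatten
  ((pvFindGT s).flatten.filter PySem.Chars.isalpha).map (fun c => String.mk [c])

-- ===== PRECONDITION & SPEC =====
def Spec_parseXMLStrings (lines : List String) (out : List String) : Prop := out = parseXMLStrings_alt lines
instance (lines : List String) (out : List String) : Decidable (Spec_parseXMLStrings lines out) := by unfold Spec_parseXMLStrings; infer_instance

-- ===== CLAIM (what is proved, stated in full; the proofs are below) =====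
def Claim_equal_parseXMLStrings : Prop := ∀ (lines : List String), Dom_parseXMLStrings lines → Spec_parseXMLStrings lines (parseXMLStrings lines)

-- ===== LEMMAS AND PROOFS =====

-- the extracted output of B's scanner / of one region
def pvOut (cs : List Char) : List String :=
  ((pvFindGT cs).flatten.filter PySem.Chars.isalpha).map (fun c => String.mk [c])

def pvReg (cs : List Char) : List String :=
  (cs.filter PySem.Chars.isalpha).map (fun c => String.mk [c])

-- A's loop, characterised in both states, by strong induction on the length
theorem pvMain : ∀ (n : Nat) (cs : List Char), cs.length ≤ n → ∀ (acc : List String),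
    (cs.foldl pvStepA (acc, false)).1 = acc ++ pvOut cs ∧
    (cs.foldl pvStepA (acc, true)).1 =
      acc ++ pvReg (cs.takeWhile (· ≠ '<')) ++ pvOut (cs.dropWhile (· ≠ '<')) := by
  intro n
  induction n with
  | zero =>
    intro cs h acc
    have : cs = [] := List.length_eq_zero_iff.mp (Nat.le_zero.mp h)
    subst this
    simp [pvOut, pvReg, pvFindGT]
  | succ n ih =>
    intro cs h acc
    match cs with
    | [] => simp [pvOut, pvReg, pvFindGT]
    | c :: rest =>
      have hr : rest.length ≤ n := by simpa using Nat.lt_succ_iff.mp (Nat.lt_of_lt_of_le (by simp) h)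
      have hd : (rest.dropWhile (· ≠ '<')).length ≤ n :=
        le_trans (rest.length_dropWhile_le _) hr
      constructor
      · -- state false
        by_cases hgt : c = '>'
        · subst hgt
          have := (ih rest hr acc).2
          simp only [List.foldl_cons, pvStepA] at this ⊢
          simp only [pvOut, pvFindGT, List.flatten_cons, List.filter_append, List.map_append]
          simpa [pvReg, pvOut] using this
        · have := (ih rest hr acc).1
          simp only [List.foldl_cons, pvStepA] at this ⊢
          by_cases hlt : c = '<' <;>
            simp_all [pvOut, pvFindGT, hgt]
      · -- state true
        by_cases hlt : c = '<'
        · subst hlt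
          have := (ih rest hr acc).1
          simp only [List.foldl_cons, pvStepA] at this ⊢
          simpa [pvReg, pvOut, pvFindGT, List.takeWhile, List.dropWhile] using this
        · have tw : (c :: rest).takeWhile (· ≠ '<') = c :: rest.takeWhile (· ≠ '<') := by
            simp [List.takeWhile, hlt]
          have dw : (c :: rest).dropWhile (· ≠ '<') = rest.dropWhile (· ≠ '<') := by
            simp [List.dropWhile, hlt]
          by_cases ha : PySem.Chars.isalpha c = true
          · have stepped : pvStepA (acc, true) c = (acc ++ [String.mk [c]], true) := by
              simp [pvStepA, hlt, ha, ite_self]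
            rw [List.foldl_cons, stepped, tw, dw, (ih rest hr (acc ++ [String.mk [c]])).2]
            simp [pvReg, List.filter_cons, ha]
          · have stepped : pvStepA (acc, true) c = (acc, true) := by
              simp [pvStepA, hlt, ha, ite_self]
            rw [List.foldl_cons, stepped, tw, dw, (ih rest hr acc).2]
            simp [pvReg, List.filter_cons, ha]

-- ===== VERDICT (by name: the statement is the Claim_ definition above) =====
theorem parseXMLStrings_spec : Claim_equal_parseXMLStrings := by
  intro lines _
  unfold Spec_parseXMLStrings parseXMLStrings parseXMLStrings_alt
  have h1 : lines.foldl (fun st line => line.toList.foldl pvStepA st) ([], false)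
      = ((lines.map String.toList).flatten).foldl pvStepA ([], false) := by
    rw [List.foldl_flatten, List.foldl_map]
  rw [h1]
  have := (pvMain ((lines.map String.toList).flatten).length _ le_rfl []).1
  simpa [pvOut] using this
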